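-- pv_equiv track=rewrite | github.com/ab180/dbt-plan | tests/test_large_manifest.py | _generate_child_map
-- ===== SOURCE A (Python) =====
-- def _generate_child_map(n_models: int, children_per_node: int = 2) -> dict[str, list[str]]:
--     """Generate a child_map where each model has `children_per_node` children.
--
--     Creates a forward-pointing DAG: model_i -> model_{i+1}, model_{i+2}, ...
--     so there are no cycles.
--     """
--     child_map: dict[str, list[str]] = {}
--     for i in range(n_models):
--         node_id = f"model.myproject.model_{i:04d}"
--         children = []
--         for offset in range(1, children_per_node + 1):
--             child_idx = i + offset
--             if child_idx < n_models:
--                 children.append(f"model.myproject.model_{child_idx:04d}")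
--         child_map[node_id] = children
--     return child_map
-- ===== SOURCE B (Python) =====
-- def _generate_child_map(n_models: int, children_per_node: int = 2) -> dict[str, list[str]]:
--     """Walk the models backwards keeping a rolling window of the following names.
--
--     Iterating i = n-1 .. 0, `window` always holds the names of the (up to k)
--     models that follow model i, so each node's child list is read off the
--     window directly; the window is then updated by pushing the current name
--     and trimming.  Names are formatted once each; no per-node child
--     generation or bounds check is needed.
--     """
--     k = max(children_per_node, 0)
--     items = []
--     window = []
--     for i in range(n_models - 1, -1, -1):
--         name = f"model.myproject.model_{i:04d}"
--         items.append((name, window))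
--         window = ([name] + window)[:k]
--     return dict(reversed(items))
-- ===== Notes on version B (the rewrite author's own statement) =====
-- stated objective: alternative
-- what changed: B traverses the models in reverse maintaining a rolling window of the names that follow the current node, reads each child list directly off the window, and builds the dict from the reversed item list; A generates each node's children with an inner bounds-checked offset loop.
import Mathlib
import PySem

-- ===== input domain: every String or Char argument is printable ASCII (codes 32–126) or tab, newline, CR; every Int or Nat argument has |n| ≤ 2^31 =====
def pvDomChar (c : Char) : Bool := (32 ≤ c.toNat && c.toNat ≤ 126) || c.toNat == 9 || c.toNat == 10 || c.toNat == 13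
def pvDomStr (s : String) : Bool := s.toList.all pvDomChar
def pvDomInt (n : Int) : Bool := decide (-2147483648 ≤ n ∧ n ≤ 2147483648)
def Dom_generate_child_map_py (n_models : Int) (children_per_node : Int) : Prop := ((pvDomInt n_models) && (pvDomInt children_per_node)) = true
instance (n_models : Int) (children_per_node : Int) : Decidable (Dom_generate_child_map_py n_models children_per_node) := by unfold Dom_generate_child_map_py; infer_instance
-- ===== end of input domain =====

-- B traverses the models in reverse with a rolling window of following names (children read
-- off the window, dict built from the reversed item list) instead of A's inner bounds-checked
-- offset loop per node; equivalent, same asymptotic cost (objective: alternative).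


-- the f-string f"model.myproject.model_{i:04d}", shared verbatim by both Pythons
def pvName (i : Int) : String :=
  String.ofList ("model.myproject.model_".toList ++ PySem.Chars.zfill (PySem.Int.toChars i) 4)

-- ===== PORT A =====
def generate_child_map_py (n_models : Int) (children_per_node : Int) : List (String × List String) :=
  ((PySem.List.pyRange 0 n_models 1).foldl
    (fun (d : PySem.Dict String (List String)) i =>
      d.insert (pvName i)
        ((PySem.List.pyRange 1 (children_per_node + 1) 1).foldl
          (fun children offset =>
            if i + offset < n_models then children ++ [pvName (i + offset)] else children)
          []))
    PySem.Dict.empty).items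

-- ===== PORT B =====
def generate_child_map_py_alt (n_models : Int) (children_per_node : Int) : List (String × List String) :=
  let k := max children_per_node 0
  let st := (PySem.List.pyRange (n_models - 1) (-1) (-1)).foldl
    (fun (st : List (String × List String) × List String) i =>
      let name := pvName i
      (st.1 ++ [(name, st.2)], PySem.List.slice (name :: st.2) none (some k)))
    ([], [])
  (PySem.Dict.ofList st.1.reverse).items

-- ===== PRECONDITION & SPEC =====
def Spec_generate_child_map_py (n_models : Int) (children_per_node : Int) (out : List (String × List String)) : Prop := out = generate_child_map_py_alt n_models children_per_node
instance (n_models : Int) (children_per_node : Int) (out : List (String × List String)) : Decidable (Spec_generate_child_map_py n_models children_per_node out) := by unfold Spec_generate_child_map_py; infer_instance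

-- ===== CLAIM (what is proved, stated in full; the proofs are below) =====
def Claim_equal_generate_child_map_py : Prop := ∀ (n_models : Int) (children_per_node : Int), Dom_generate_child_map_py n_models children_per_node → Spec_generate_child_map_py n_models children_per_node (generate_child_map_py n_models children_per_node)

-- ===== LEMMAS AND PROOFS =====

-- canonical description both ports are reduced to: child list of node i, node pair, whole map
def pvChildren (n c i : Int) : List String :=
  (PySem.List.pyRange (i + 1) (min (i + 1 + max c 0) n) 1).map pvName
def pvPair (n c i : Int) : String × List String := (pvName i, pvChildren n c i)
def pvL (n c : Int) : List (String × List String) := (PySem.List.pyRange 0 n 1).map (pvPair n c)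

-- decimal value of a digit string (proof-only helper, for injectivity of pvName)
def pvVal (cs : List Char) : Nat := cs.foldl (fun a c => 10 * a + (c.toNat - 48)) 0

theorem pvVal_zeros_append (j : Nat) (cs : List Char) :
    pvVal (List.replicate j '0' ++ cs) = pvVal cs := by
  induction j with
  | zero => simp
  | succ j ih => simpa [pvVal, List.replicate_succ, List.foldl_cons] using ih

theorem pv_digitChar_bounds (m : Nat) (h : m < 10) :
    48 ≤ (Nat.digitChar m).toNat ∧ (Nat.digitChar m).toNat ≤ 57 := by
  interval_cases m <;> decide

theorem pv_tdc_shape (f : Nat) : ∀ (n : Nat) (ds : List Char),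
    Nat.toDigitsCore 10 f n ds = Nat.toDigitsCore 10 f n [] ++ ds := by
  induction f with
  | zero => intro n ds; simp [Nat.toDigitsCore]
  | succ f ih =>
    intro n ds
    simp only [Nat.toDigitsCore]
    by_cases h : n / 10 = 0
    · simp [h]
    · simp only [h]
      rw [ih (n / 10) ([(n % 10).digitChar]), ih (n / 10) ((n % 10).digitChar :: ds)]
      simp

theorem pv_tdc_digits (f : Nat) : ∀ (n : Nat) (ds : List Char),
    (∀ c ∈ ds, 48 ≤ c.toNat ∧ c.toNat ≤ 57) →
    ∀ c ∈ Nat.toDigitsCore 10 f n ds, 48 ≤ c.toNat ∧ c.toNat ≤ 57 := by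
  induction f with
  | zero => intro n ds hds; simpa [Nat.toDigitsCore] using hds
  | succ f ih =>
    intro n ds hds
    simp only [Nat.toDigitsCore]
    by_cases h : n / 10 = 0
    · simp only [h]
      intro c hc
      rcases List.mem_cons.mp hc with rfl | hc
      · exact pv_digitChar_bounds _ (Nat.mod_lt _ (by norm_num))
      · exact hds c hc
    · simp only [if_neg h]
      refine ih (n / 10) _ ?_
      intro c hc
      rcases List.mem_cons.mp hc with rfl | hc
      · exact pv_digitChar_bounds _ (Nat.mod_lt _ (by norm_num))
      · exact hds c hc

theorem pv_val_tdc (f : Nat) : ∀ (n : Nat), n < 10 ^ f →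
    pvVal (Nat.toDigitsCore 10 f n []) = n := by
  induction f with
  | zero => intro n hn; interval_cases n; simp [Nat.toDigitsCore, pvVal]
  | succ f ih =>
    intro n hn
    simp only [Nat.toDigitsCore]
    by_cases h : n / 10 = 0
    · have h10 : n < 10 := by omega
      simp only [h]
      have := pv_digitChar_bounds (n % 10) (Nat.mod_lt _ (by norm_num))
      have hch : (Nat.digitChar (n % 10)).toNat = n % 10 + 48 := by
        have : n % 10 < 10 := Nat.mod_lt _ (by norm_num)
        interval_cases h : (n % 10) <;> simp [Nat.digitChar]
      simp [pvVal, hch]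
      omega
    · simp only [if_neg h]
      rw [pv_tdc_shape]
      have hq : n / 10 < 10 ^ f := by
        have h3 : n < 10 ^ f * 10 := by rw [← pow_succ]; exact hn
        exact Nat.div_lt_of_lt_mul (by rw [mul_comm]; exact h3)
      have hch : (Nat.digitChar (n % 10)).toNat = n % 10 + 48 := by
        have : n % 10 < 10 := Nat.mod_lt _ (by norm_num)
        interval_cases h : (n % 10) <;> simp [Nat.digitChar]
      have hv := ih (n / 10) hq
      simp [pvVal, List.foldl_append, hch] at *
      rw [hv]
      omega

theorem pv_val_toDigits (m : Nat) : pvVal (Nat.toDigits 10 m) = m := by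
  have hm : m < 10 ^ (m + 1) := by
    calc m < 2 ^ (m + 1) := by
            have := Nat.lt_two_pow_self (n := m); omega
    _ ≤ 10 ^ (m + 1) := Nat.pow_le_pow_left (by norm_num) _
  exact pv_val_tdc (m + 1) m hm

theorem pv_toDigits_digits (m : Nat) :
    ∀ c ∈ Nat.toDigits 10 m, 48 ≤ c.toNat ∧ c.toNat ≤ 57 := by
  exact pv_tdc_digits (m + 1) m [] (by simp)

-- zfill of a nonnegative decimal rendering just left-pads zeros
theorem pv_zfill_toChars (i : Int) (hi : 0 ≤ i) :
    PySem.Chars.zfill (PySem.Int.toChars i) 4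
      = List.replicate (4 - (PySem.Int.toChars i).length) '0' ++ PySem.Int.toChars i := by
  have htc : PySem.Int.toChars i = Nat.toDigits 10 i.toNat := by
    simp [PySem.Int.toChars, not_lt.mpr hi]
  rw [htc]
  unfold PySem.Chars.zfill
  by_cases hlen : (4 : Int) ≤ (Nat.toDigits 10 i.toNat).length
  · have : (4 : Nat) - (Nat.toDigits 10 i.toNat).length = 0 := by omega
    simp [hlen, this]
  · rcases hcs : Nat.toDigits 10 i.toNat with _ | ⟨c, rest⟩
    · simp
    · have hc := pv_toDigits_digits i.toNat c (by rw [hcs]; exact List.mem_cons_self)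
      have hns : ¬ (c = '+' ∨ c = '-') := by
        rintro (rfl | rfl) <;> simp [Char.toNat] at hc
      simp only [if_neg hns]
      simp
      omega

theorem pvVal_zfill_toChars (i : Int) (hi : 0 ≤ i) :
    pvVal (PySem.Chars.zfill (PySem.Int.toChars i) 4) = i.toNat := by
  rw [pv_zfill_toChars i hi, pvVal_zeros_append]
  have : PySem.Int.toChars i = Nat.toDigits 10 i.toNat := by
    simp [PySem.Int.toChars, not_lt.mpr hi]
  rw [this, pv_val_toDigits]

theorem pvName_injOn (a b : Int) (ha : 0 ≤ a) (hb : 0 ≤ b) (h : pvName a = pvName b) :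
    a = b := by
  have h2 : PySem.Chars.zfill (PySem.Int.toChars a) 4 = PySem.Chars.zfill (PySem.Int.toChars b) 4 := by
    have := congrArg String.toList h
    simp only [pvName, String.toList_ofList] at this
    exact List.append_cancel_left this
  have := congrArg pvVal h2
  rw [pvVal_zfill_toChars a ha, pvVal_zfill_toChars b hb] at this
  omega

theorem pv_names_nodup (n : Int) : (((PySem.List.pyRange 0 n 1).map pvName)).Nodup := by
  refine List.Nodup.map_on ?_ (PySem.List.nodup_pyRange_one 0 n)
  intro x hx y hy hxy
  rw [PySem.List.mem_pyRange_one] at hx hy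
  exact pvName_injOn x y hx.1 hy.1 hxy

-- ===== A side: the inner offset loop of node i builds exactly pvChildren n c i =====
theorem pv_inner_eq (n c i : Int) (hi : i < n) :
    (PySem.List.pyRange 1 (c + 1) 1).foldl
      (fun children offset =>
        if i + offset < n then children ++ [pvName (i + offset)] else children) []
    = pvChildren n c i := by
  unfold pvChildren
  rw [show (fun (children : List String) (offset : Int) =>
        if i + offset < n then children ++ [pvName (i + offset)] else children)
      = (fun (acc : List String) (x : Int) =>
        if (fun o => decide (i + o < n)) x = true then acc ++ [(fun o => pvName (i + o)) x] else acc) from by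
      funext a b; simp]
  rw [PySem.List.foldl_append_if]
  simp only [List.nil_append]
  by_cases hc : c ≤ 0
  · rw [PySem.List.pyRange_one_eq_nil (show c + 1 ≤ 1 by omega),
        PySem.List.pyRange_one_eq_nil (show min (i + 1 + max c 0) n ≤ i + 1 by omega)]
    simp
  · have hm1 : (1:Int) ≤ min (c+1) (n-i) := by omega
    have hm2 : min (c+1) (n-i) ≤ c + 1 := by omega
    rw [show PySem.List.pyRange 1 (c+1) 1
          = PySem.List.pyRange 1 (min (c+1) (n-i)) 1 ++ PySem.List.pyRange (min (c+1) (n-i)) (c+1) 1 from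
        PySem.List.pyRange_one_append _ _ _ hm1 hm2]
    rw [List.filter_append]
    have hf1 : (PySem.List.pyRange 1 (min (c+1) (n-i)) 1).filter (fun o => decide (i + o < n))
        = PySem.List.pyRange 1 (min (c+1) (n-i)) 1 := by
      refine List.filter_eq_self.mpr ?_
      intro o ho
      rw [PySem.List.mem_pyRange_one] at ho
      simp only [decide_eq_true_eq]
      omega
    have hf2 : (PySem.List.pyRange (min (c+1) (n-i)) (c+1) 1).filter (fun o => decide (i + o < n))
        = [] := by
      refine List.filter_eq_nil_iff.mpr ?_
      intro o ho
      rw [PySem.List.mem_pyRange_one] at ho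
      simp only [decide_eq_true_eq]
      omega
    rw [hf1, hf2, List.append_nil]
    rw [PySem.List.pyRange_one 1 (min (c+1) (n-i)),
        PySem.List.pyRange_one (i+1) (min (i + 1 + max c 0) n)]
    rw [List.map_map, List.map_map]
    have hlen : ((min (c+1) (n-i)) - 1).toNat = ((min (i + 1 + max c 0) n) - (i+1)).toNat := by omega
    rw [hlen]
    refine List.map_congr_left ?_
    intro t _
    simp only [Function.comp_apply]
    congr 1
    ring

theorem pvA_eq (n c : Int) : generate_child_map_py n c = pvL n c := by
  unfold generate_child_map_py pvL
  rw [PySem.Dict.items_foldl_insert_fresh _ pvName _ PySem.Dict.empty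
        (fun a _ => PySem.Dict.contains_empty _) (pv_names_nodup n)]
  have hempty : (PySem.Dict.empty : PySem.Dict String (List String)).items = [] := rfl
  rw [hempty]
  simp only [List.nil_append]
  refine List.map_congr_left ?_
  intro i hi
  rw [PySem.List.mem_pyRange_one] at hi
  unfold pvPair
  rw [pv_inner_eq n c i hi.2]

-- ===== B side: the rolling window maintained by the reverse loop is pvChildren =====
theorem pv_take_pyRange (a b : Int) (t : Nat) :
    (PySem.List.pyRange a b 1).take t = PySem.List.pyRange a (min (a + t) b) 1 := by
  rw [PySem.List.pyRange_one a b, PySem.List.pyRange_one a (min (a + t) b)]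
  rw [← List.map_take, List.take_range]
  congr 2
  omega

theorem pv_window_step (n c m : Int) (hm : m < n) :
    PySem.List.slice (pvName m :: pvChildren n c m) none (some (max c 0)) = pvChildren n c (m - 1) := by
  rw [PySem.List.slice_to _ (le_max_right c 0)]
  unfold pvChildren
  rw [← List.map_cons, ← PySem.List.pyRange_one_cons (show m < min (m + 1 + max c 0) n by omega)]
  rw [← List.map_take, pv_take_pyRange]
  rw [show m - 1 + 1 = m from by ring]
  congr 2
  omega

theorem pvB_loop (n c : Int) (t : Nat) : ∀ (m : Int), m + 1 = t → m < n →
    ∀ acc : List (String × List String),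
    ((PySem.List.pyRange m (-1) (-1)).foldl
      (fun (st : List (String × List String) × List String) i =>
        (st.1 ++ [(pvName i, st.2)], PySem.List.slice (pvName i :: st.2) none (some (max c 0))))
      (acc, pvChildren n c m)).1
    = acc ++ ((PySem.List.pyRange 0 (m + 1) 1).map (pvPair n c)).reverse := by
  induction t with
  | zero =>
    intro m hm _ acc
    have hm1 : m = -1 := by omega
    subst hm1
    rw [PySem.List.pyRange_neg_one_eq_nil (le_refl (-1)),
        PySem.List.pyRange_one_eq_nil (by omega : (-1:Int) + 1 ≤ 0)]
    simp
  | succ t ih =>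
    intro m hm hmn acc
    have h0 : 0 ≤ m := by omega
    rw [PySem.List.pyRange_neg_one_cons (show (-1:Int) < m by omega)]
    rw [List.foldl_cons]
    simp only
    rw [pv_window_step n c m hmn]
    rw [ih (m - 1) (by omega) (by omega) (acc ++ [(pvName m, pvChildren n c m)])]
    rw [show m - 1 + 1 = m from by ring,
        PySem.List.pyRange_one_succ_right (show (0:Int) ≤ m from h0)]
    simp [pvPair]

theorem pvB_eq (n c : Int) : generate_child_map_py_alt n c = pvL n c := by
  unfold generate_child_map_py_alt
  simp only
  by_cases hn : 0 < n
  · have hwin : pvChildren n c (n - 1) = [] := by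
      unfold pvChildren
      rw [show n - 1 + 1 = n from by ring]
      rw [PySem.List.pyRange_one_eq_nil (min_le_right _ _)]
      rfl
    rw [← hwin]
    rw [pvB_loop n c n.toNat (n - 1) (by omega) (by omega) []]
    rw [show n - 1 + 1 = n from by ring]
    simp only [List.nil_append, List.reverse_reverse]
    rw [show PySem.Dict.ofList ((PySem.List.pyRange 0 n 1).map (pvPair n c))
          = ((PySem.List.pyRange 0 n 1).map (pvPair n c)).foldl
              (fun (d : PySem.Dict String (List String)) p => d.insert p.1 p.2)
              PySem.Dict.empty from rfl]
    rw [PySem.Dict.items_foldl_insert_fresh _ Prod.fst Prod.snd PySem.Dict.empty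
          (fun a _ => PySem.Dict.contains_empty _) ?nodup]
    case nodup =>
      rw [List.map_map]
      have : (Prod.fst ∘ pvPair n c) = pvName := by funext i; rfl
      rw [this]
      exact pv_names_nodup n
    have hempty : (PySem.Dict.empty : PySem.Dict String (List String)).items = [] := rfl
    rw [hempty]
    simp [pvL]
  · rw [PySem.List.pyRange_neg_one_eq_nil (show n - 1 ≤ -1 by omega)]
    rw [pvL, PySem.List.pyRange_one_eq_nil (show n ≤ 0 by omega)]
    simp
    rfl

-- ===== VERDICT (by name: the statement is the Claim_ definition above) =====
theorem generate_child_map_py_spec : Claim_equal_generate_child_map_py := by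
  intro n c _
  unfold Spec_generate_child_map_py
  rw [pvA_eq, pvB_eq]
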